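-- pv_equiv track=rewrite | github.com/chopdev/leetcode_tasks | dynamic_programming/CtCI_8_5_recursive_multiply/Solution.py | multiply_rec
-- ===== SOURCE A (Python) =====
-- def multiply_rec(smaller: int, bigger: int) -> int:
--     if smaller == 0: return 0
--     if smaller == 1: return bigger
--
--     rest = 0
--     if (smaller & 1 == 1): # if smaller is odd
--         rest = bigger
--         smaller -= 1 # remove one to make it even, but remember that 1 in rest
--
--     sum = multiply_rec(smaller >> 1, bigger) # divide smaller on 2
--     return sum + sum + rest # multiply back on 2
-- ===== SOURCE B (Python) =====
-- def multiply_rec(smaller: int, bigger: int) -> int: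
--     # Iterative Russian-peasant loop: same doubling recurrence, no recursion.
--     result = 0
--     while smaller:
--         if smaller & 1:
--             result += bigger
--         bigger <<= 1
--         smaller >>= 1
--     return result
-- ===== Notes on version B (the rewrite author's own statement) =====
-- stated objective: idiomatic
-- what changed: Replaced the recursive halving/doubling with an iterative Russian-peasant loop accumulating bigger at each set bit of smaller.
import Mathlib
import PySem

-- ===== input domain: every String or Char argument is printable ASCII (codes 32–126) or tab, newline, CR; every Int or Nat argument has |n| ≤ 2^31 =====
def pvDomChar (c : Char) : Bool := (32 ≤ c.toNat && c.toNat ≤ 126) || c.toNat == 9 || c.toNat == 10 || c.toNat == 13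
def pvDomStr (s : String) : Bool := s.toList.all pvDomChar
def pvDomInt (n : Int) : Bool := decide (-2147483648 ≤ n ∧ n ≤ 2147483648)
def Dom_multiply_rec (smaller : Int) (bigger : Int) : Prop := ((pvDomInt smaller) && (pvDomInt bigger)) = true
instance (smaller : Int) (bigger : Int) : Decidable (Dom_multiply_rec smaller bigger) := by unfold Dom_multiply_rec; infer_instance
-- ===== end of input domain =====

-- B replaces the recursion with the iterative Russian-peasant loop; return values proved equal for smaller ≥ 0.

-- ===== PORT A =====
-- A's recursion, step for step, on the Nat value of smaller (the recursion only
-- terminates for smaller ≥ 0, which Pre_ requires; for s ≥ 0, s & 1 = s % 2 and s >> 1 = s / 2).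
def multiplyRecNat (s : Nat) (bigger : Int) : Int :=
  if s = 0 then 0
  else if s = 1 then bigger
  else
    let rest : Int := if s % 2 = 1 then bigger else 0
    let s' : Nat := if s % 2 = 1 then s - 1 else s
    let sum := multiplyRecNat (s' / 2) bigger
    sum + sum + rest
decreasing_by
  split_ifs <;> omega

def multiply_rec (smaller : Int) (bigger : Int) : Int :=
  multiplyRecNat smaller.toNat bigger

-- ===== PORT B =====
-- B's while loop: state (smaller, bigger, result), iterated until smaller = 0.
def peasantLoop (s : Nat) (b : Int) (result : Int) : Int :=
  if s = 0 then result
  else peasantLoop (s / 2) (b * 2) (if s % 2 = 1 then result + b else result)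
decreasing_by omega

def multiply_rec_alt (smaller : Int) (bigger : Int) : Int :=
  peasantLoop smaller.toNat bigger 0

-- ===== PRECONDITION & SPEC =====
-- Pre_ excludes smaller < 0, on which the Python A recurses forever (RecursionError) and B loops forever.
def Pre_multiply_rec (smaller : Int) (bigger : Int) : Prop := 0 ≤ smaller
instance (smaller : Int) (bigger : Int) : Decidable (Pre_multiply_rec smaller bigger) := by unfold Pre_multiply_rec; infer_instance
def pvWitness_multiply_rec : Int × Int := (6, -7)

def Spec_multiply_rec (smaller : Int) (bigger : Int) (out : Int) : Prop := out = multiply_rec_alt smaller bigger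
instance (smaller : Int) (bigger : Int) (out : Int) : Decidable (Spec_multiply_rec smaller bigger out) := by unfold Spec_multiply_rec; infer_instance

-- ===== CLAIM (what is proved, stated in full; the proofs are below) =====
def Claim_equal_multiply_rec : Prop := ∀ (smaller : Int) (bigger : Int), Dom_multiply_rec smaller bigger → Pre_multiply_rec smaller bigger → Spec_multiply_rec smaller bigger (multiply_rec smaller bigger)

-- ===== LEMMAS AND PROOFS =====

theorem multiplyRecNat_eq (s : Nat) (b : Int) : multiplyRecNat s b = (s : Int) * b := by
  induction s using Nat.strong_induction_on with
  | _ s ih =>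
    rw [multiplyRecNat]
    dsimp only
    split_ifs with h0 h1 hodd
    · simp [h0]
    · simp [h1]
    · -- s odd, s ≥ 2 (in fact ≥ 3)
      rw [ih ((s - 1) / 2) (by omega)]
      have h2 : ((s - 1) / 2 : Nat) * 2 + 1 = s := by omega
      have : (((s - 1) / 2 : Nat) : Int) * 2 + 1 = (s : Int) := by exact_mod_cast congrArg (Nat.cast : Nat → Int) h2
      rw [← this]; ring
    · -- s even, s ≥ 2
      rw [ih (s / 2) (by omega)]
      have h2 : (s / 2 : Nat) * 2 = s := by omega
      have : ((s / 2 : Nat) : Int) * 2 = (s : Int) := by exact_mod_cast congrArg (Nat.cast : Nat → Int) h2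
      rw [← this]; ring

theorem peasantLoop_eq (s : Nat) (b acc : Int) : peasantLoop s b acc = acc + (s : Int) * b := by
  induction s using Nat.strong_induction_on generalizing b acc with
  | _ s ih =>
    rw [peasantLoop]
    split_ifs with h0 hodd
    · simp [h0]
    · rw [ih (s / 2) (by omega)]
      have h2 : (s / 2 : Nat) * 2 + 1 = s := by omega
      have : ((s / 2 : Nat) : Int) * 2 + 1 = (s : Int) := by exact_mod_cast congrArg (Nat.cast : Nat → Int) h2
      rw [← this]; ring
    · rw [ih (s / 2) (by omega)]
      have h2 : (s / 2 : Nat) * 2 = s := by omega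
      have : ((s / 2 : Nat) : Int) * 2 = (s : Int) := by exact_mod_cast congrArg (Nat.cast : Nat → Int) h2
      rw [← this]; ring

-- ===== VERDICT (by name: the statement is the Claim_ definition above) =====
theorem multiply_rec_spec : Claim_equal_multiply_rec := by
  intro smaller bigger _ _
  unfold Spec_multiply_rec multiply_rec multiply_rec_alt
  rw [multiplyRecNat_eq, peasantLoop_eq, zero_add]
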